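-- pv_equiv track=rewrite | github.com/Kavinchandar/Coder-Dungeon | maximum_ppossible_subset_gcd.py | max_possible_gcd
-- ===== SOURCE A (Python) =====
-- import itertools
--
-- def find_gcd(x, y):
--     if y == 0:
--         return x
--     else:
--         return find_gcd(y, x % y)
--
-- def gcd(lst):
--     num1 = lst[0]
--     num2 = lst[1]
--     gcd = find_gcd(num1, num2)
--     for i in range(2, len(lst)):
--         gcd = find_gcd(gcd, lst[i])
--     return gcd
--
-- def findsubsets(s, n):
--     return list(itertools.combinations(s, n))
--
-- def subsets(lst):
--     n = len(lst)
--     subset = {}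
--     while n > 1:
--         try:
--             subset[n].append(findsubsets(lst, n))
--         except KeyError:
--             subset[n] = findsubsets(lst, n)
--         n -= 1
--     return subset
--
-- def max_possible_gcd(lst):
--     m = 0
--     test = subsets(lst)
--     for i in test:
--         if i >= 2:
--             for j in test[i]:
--                 m = max(m, gcd(j))
--     return m
-- ===== SOURCE B (Python) =====
-- # B: max over PAIRS only (the gcd of any larger subset divides the gcd of
-- # some pair, so pairs suffice) with an iterative Euclid; O(n^2 log) vs A's O(2^n).
-- def max_possible_gcd(lst):
--     m = 0
--     for i, a in enumerate(lst):
--         for b in lst[i + 1:]: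
--             x, y = a, b
--             while y != 0:
--                 x, y = y, x % y
--             if x > m:
--                 m = x
--     return m
-- ===== Notes on version B (the rewrite author's own statement) =====
-- stated objective: faster
-- what changed: B scans only the pairs with an iterative Euclid instead of enumerating every subset of size >= 2 via a dict of itertools.combinations and folding gcd over each; the gcd of any larger subset never beats the best pair.
import Mathlib
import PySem

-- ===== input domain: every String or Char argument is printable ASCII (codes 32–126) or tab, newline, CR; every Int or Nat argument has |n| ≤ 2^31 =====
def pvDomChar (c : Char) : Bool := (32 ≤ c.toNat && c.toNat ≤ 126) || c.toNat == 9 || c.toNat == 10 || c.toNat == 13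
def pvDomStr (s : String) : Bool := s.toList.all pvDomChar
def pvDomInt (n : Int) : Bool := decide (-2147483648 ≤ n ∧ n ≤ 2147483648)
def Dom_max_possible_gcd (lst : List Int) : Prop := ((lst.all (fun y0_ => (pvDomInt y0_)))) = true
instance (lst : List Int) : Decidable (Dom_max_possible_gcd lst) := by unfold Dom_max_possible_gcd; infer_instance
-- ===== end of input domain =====

-- B replaces A's enumeration of ALL subsets of size ≥ 2 by a scan over PAIRS only
-- (the gcd of a larger subset divides the gcd of one of its pairs), with an
-- iterative Euclid; measured faster on the generated inputs.

-- ===== PORT A =====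
-- find_gcd(x, y): recursive Euclid with Python's % (sign of the divisor)
def find_gcd (x y : Int) : Int :=
  if y = 0 then x else find_gcd y (PySem.Int.mod x y)
termination_by y.natAbs
decreasing_by
  rcases lt_trichotomy y 0 with hy | hy | hy
  · have h1 := PySem.Int.mod_neg_bounds x hy; omega
  · omega
  · have h1 := PySem.Int.mod_nonneg x hy; have h2 := PySem.Int.mod_lt x hy; omega

-- gcd(lst): lst[0], lst[1], then fold over range(2, len(lst)).
-- A only calls it on subsets of length ≥ 2; the `_` branch is unreachable there.
def gcd_list (l : List Int) : Int :=
  match l with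
  | a :: b :: rest => rest.foldl find_gcd (find_gcd a b)
  | _ => 0

-- itertools.combinations(s, n): lexicographic by index (tuples ported as lists)
def combos (s : List Int) (n : Nat) : List (List Int) :=
  match n, s with
  | 0, _ => [[]]
  | _ + 1, [] => []
  | n + 1, x :: xs => (combos xs n).map (fun c => x :: c) ++ combos xs (n + 1)

def findsubsets (s : List Int) (n : Int) : List (List Int) := combos s n.toNat

-- subsets(lst): the while loop; each key n is fresh, so `subset[n].append(...)`
-- ALWAYS raises KeyError and the except branch `subset[n] = findsubsets(lst, n)`
-- runs (the try branch is untypeable and unreachable; ported as the insert).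
def subsets_go (lst : List Int) (n : Int) (d : PySem.Dict Int (List (List Int))) :
    PySem.Dict Int (List (List Int)) :=
  if 1 < n then subsets_go lst (n - 1) (d.insert n (findsubsets lst n)) else d
termination_by n.toNat
decreasing_by omega

def subsets_port (lst : List Int) : PySem.Dict Int (List (List Int)) :=
  subsets_go lst (lst.length : Int) PySem.Dict.empty

-- for i in test: iterates the keys; test[i] never raises (i is a key): getD
def max_possible_gcd (lst : List Int) : Int :=
  let test := subsets_port lst
  test.keys.foldl
    (fun m i =>
      if 2 ≤ i then (test.getD i []).foldl (fun m j => max m (gcd_list j)) m else m)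
    0

-- ===== PORT B =====
-- the inner while loop of Source B
def euclid_loop (x y : Int) : Int :=
  if y ≠ 0 then euclid_loop y (PySem.Int.mod x y) else x
termination_by y.natAbs
decreasing_by
  rcases lt_trichotomy y 0 with hy | hy | hy
  · have h1 := PySem.Int.mod_neg_bounds x hy; omega
  · omega
  · have h1 := PySem.Int.mod_nonneg x hy; have h2 := PySem.Int.mod_lt x hy; omega

-- for i, a in enumerate(lst): for b in lst[i+1:]: …
def alt_go (l : List Int) (m : Int) : Int :=
  match l with
  | [] => m
  | a :: rest =>
      alt_go rest
        (rest.foldl (fun m b => let x := euclid_loop a b; if x > m then x else m) m)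

def max_possible_gcd_alt (lst : List Int) : Int := alt_go lst 0

-- ===== PRECONDITION & SPEC =====
def Spec_max_possible_gcd (lst : List Int) (out : Int) : Prop := out = max_possible_gcd_alt lst
instance (lst : List Int) (out : Int) : Decidable (Spec_max_possible_gcd lst out) := by unfold Spec_max_possible_gcd; infer_instance

-- ===== CLAIM (what is proved, stated in full; the proofs are below) =====
def Claim_equal_max_possible_gcd : Prop := ∀ (lst : List Int), Dom_max_possible_gcd lst → Spec_max_possible_gcd lst (max_possible_gcd lst)

-- ===== LEMMAS AND PROOFS =====

-- [n, n-1, …, 2] : the keys the while loop inserts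
def sizesI (n : Int) : List Int :=
  ((List.range' 2 (n - 1).toNat).reverse).map Int.ofNat

-- the list of pair-gcd values B's two loops scan
def pv (l : List Int) : List Int :=
  match l with
  | [] => []
  | a :: rest => rest.map (find_gcd a) ++ pv rest


theorem sizesI_cons (n : Int) (h : 1 < n) : sizesI n = n :: sizesI (n - 1) := by
  unfold sizesI
  have h1 : (n - 1).toNat = (n - 2).toNat + 1 := by omega
  have h2 : n - 1 - 1 = n - 2 := by ring
  rw [h1, h2, List.range'_1_concat, List.reverse_append]
  simp only [List.reverse_cons, List.reverse_nil, List.nil_append, List.singleton_append,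
    List.map_cons]
  have h3 : Int.ofNat (2 + (n - 2).toNat) = n := by
    simp only [Int.ofNat_eq_natCast]; push_cast; omega
  rw [h3]

theorem mem_sizesI {i n : Int} : i ∈ sizesI n ↔ 2 ≤ i ∧ i ≤ n := by
  unfold sizesI
  simp only [List.mem_map, List.mem_reverse, List.mem_range', Int.ofNat_eq_natCast]
  constructor
  · rintro ⟨k, ⟨j, hj, rfl⟩, rfl⟩; omega
  · rintro ⟨h1, h2⟩
    refine ⟨i.toNat, ⟨(i - 2).toNat, by omega, by omega⟩, by omega⟩

theorem euclid_eq_find_gcd (x y : Int) : euclid_loop x y = find_gcd x y := by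
  fun_induction euclid_loop x y
  case case1 => rename_i h ih; rw [find_gcd, if_neg h, ih]
  case case2 => rename_i h; rw [find_gcd, if_pos (by omega)]

theorem natAbs_find_gcd (x y : Int) : (find_gcd x y).natAbs = Int.gcd x y := by
  fun_induction find_gcd x y
  case case1 => rw [Int.gcd_zero_right]
  case case2 =>
    rename_i x y h ih
    rw [ih]
    have hm := PySem.Int.floordiv_mul_add_mod x y
    have h2 : PySem.Int.mod x y = x + y * (-(PySem.Int.floordiv x y)) := by
      linear_combination hm
    rw [h2, Int.gcd_add_mul_left_right, Int.gcd_comm]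

theorem find_gcd_pos_aux : ∀ (k : Nat) (x y : Int), y.natAbs ≤ k → 0 < y → 0 < find_gcd x y := by
  intro k
  induction k with
  | zero => intro x y h1 h2; omega
  | succ k ih =>
    intro x y h1 h2
    rw [find_gcd, if_neg (by omega)]
    have hm1 := PySem.Int.mod_nonneg x h2
    have hm2 := PySem.Int.mod_lt x h2
    by_cases hr : PySem.Int.mod x y = 0
    · rw [hr, find_gcd, if_pos rfl]; exact h2
    · exact ih y _ (by omega) (by omega)

theorem find_gcd_pos (x y : Int) (h : 0 < y) : 0 < find_gcd x y :=
  find_gcd_pos_aux y.natAbs x y le_rfl h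

theorem find_gcd_neg_aux : ∀ (k : Nat) (x y : Int), y.natAbs ≤ k → y < 0 → find_gcd x y < 0 := by
  intro k
  induction k with
  | zero => intro x y h1 h2; omega
  | succ k ih =>
    intro x y h1 h2
    rw [find_gcd, if_neg (by omega)]
    have hm := PySem.Int.mod_neg_bounds x h2
    by_cases hr : PySem.Int.mod x y = 0
    · rw [hr, find_gcd, if_pos rfl]; exact h2
    · exact ih y _ (by omega) (by omega)

theorem find_gcd_neg (x y : Int) (h : y < 0) : find_gcd x y < 0 :=
  find_gcd_neg_aux y.natAbs x y le_rfl h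

theorem find_gcd_pos_cases {x y : Int} (h : 0 < find_gcd x y) :
    0 < y ∨ (y = 0 ∧ 0 < x) := by
  rcases lt_trichotomy y 0 with hy | hy | hy
  · have := find_gcd_neg x y hy; omega
  · right
    refine ⟨hy, ?_⟩
    subst hy
    rw [find_gcd, if_pos rfl] at h
    exact h
  · left; exact hy

theorem natAbs_foldl (l : List Int) (g : Int) :
    (l.foldl find_gcd g).natAbs = l.foldl (fun n x => Nat.gcd n x.natAbs) g.natAbs := by
  induction l generalizing g with
  | nil => rfl
  | cons x t ih =>
    simp only [List.foldl_cons]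
    rw [ih, natAbs_find_gcd]
    rfl

theorem natfold_dvd_seed (l : List Int) (s : Nat) :
    l.foldl (fun n x => Nat.gcd n x.natAbs) s ∣ s := by
  induction l generalizing s with
  | nil => exact dvd_refl s
  | cons x t ih =>
    simp only [List.foldl_cons]
    exact dvd_trans (ih _) (Nat.gcd_dvd_left _ _)

-- the gcd of a subset a::b::rest, if positive, is ≤ the gcd of the pair (a, z) for some z
theorem exists_pair (rest : List Int) (a b : Int)
    (h : 0 < rest.foldl find_gcd (find_gcd a b)) :
    ∃ z ∈ b :: rest, rest.foldl find_gcd (find_gcd a b) ≤ find_gcd a z ∧ 0 < find_gcd a z := by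
  induction rest using List.reverseRecOn with
  | nil => exact ⟨b, by simp, le_refl _, by simpa using h⟩
  | append_singleton l z ih =>
    rw [List.foldl_append, List.foldl_cons, List.foldl_nil] at h
    rcases find_gcd_pos_cases h with hz | ⟨hz, hG⟩
    · have hpz := find_gcd_pos a z hz
      have habs : (l.foldl find_gcd (find_gcd a b)).natAbs =
          l.foldl (fun n x => Nat.gcd n x.natAbs) (Nat.gcd a.natAbs b.natAbs) := by
        rw [natAbs_foldl, natAbs_find_gcd]; rfl
      have hG := h
      have h1 : (find_gcd (l.foldl find_gcd (find_gcd a b)) z).natAbs ∣ a.natAbs := by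
        rw [natAbs_find_gcd]
        have : Int.gcd (l.foldl find_gcd (find_gcd a b)) z ∣ (l.foldl find_gcd (find_gcd a b)).natAbs :=
          Int.gcd_dvd_natAbs_left _ _
        refine dvd_trans this ?_
        rw [habs]
        exact dvd_trans (natfold_dvd_seed _ _) (Nat.gcd_dvd_left _ _)
      have h2 : (find_gcd (l.foldl find_gcd (find_gcd a b)) z).natAbs ∣ z.natAbs := by
        rw [natAbs_find_gcd]
        exact Int.gcd_dvd_natAbs_right _ _
      have h3 : (find_gcd (l.foldl find_gcd (find_gcd a b)) z).natAbs ∣ (find_gcd a z).natAbs := by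
        rw [natAbs_find_gcd a z]
        exact Nat.dvd_gcd h1 h2
      have h4 : (find_gcd (l.foldl find_gcd (find_gcd a b)) z).natAbs ≤ (find_gcd a z).natAbs :=
        Nat.le_of_dvd (by omega) h3
      refine ⟨z, by simp, ?_, hpz⟩
      rw [List.foldl_append, List.foldl_cons, List.foldl_nil]
      omega
    · have hE : find_gcd (l.foldl find_gcd (find_gcd a b)) z = l.foldl find_gcd (find_gcd a b) := by
        rw [hz, find_gcd, if_pos rfl]
      rw [hE] at h
      obtain ⟨z', hz', hle, hpos⟩ := ih h
      refine ⟨z', ?_, ?_, hpos⟩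
      · simp only [List.mem_cons, List.mem_append] at hz' ⊢
        tauto
      · rw [List.foldl_append, List.foldl_cons, List.foldl_nil, hE]
        exact hle

theorem combos_mem (c lst : List Int) (k : Nat) (h : c ∈ combos lst k) :
    c.Sublist lst ∧ c.length = k := by
  induction lst generalizing k c with
  | nil =>
    cases k with
    | zero => simp [combos] at h; subst h; simp
    | succ k => simp [combos] at h
  | cons x xs ih =>
    cases k with
    | zero => simp [combos] at h; subst h; simp
    | succ k =>
      simp only [combos, List.mem_append, List.mem_map] at h
      rcases h with ⟨c', hc', rfl⟩ | h
      · obtain ⟨hs, hl⟩ := ih c' k hc'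
        exact ⟨hs.cons₂ x, by simp [hl]⟩
      · obtain ⟨hs, hl⟩ := ih c (k + 1) h
        exact ⟨hs.cons x, hl⟩

theorem mem_combos_of_sublist {c lst : List Int} (h : c.Sublist lst) :
    c ∈ combos lst c.length := by
  induction h with
  | slnil => exact List.mem_singleton.mpr rfl
  | @cons l1 l2 a h ih =>
    cases l1 with
    | nil => exact List.mem_singleton.mpr rfl
    | cons y ys =>
      simp only [List.length_cons, combos, List.mem_append]
      right
      exact ih
  | @cons₂ l1 l2 a h ih =>
    simp only [List.length_cons, combos, List.mem_append, List.mem_map]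
    left
    exact ⟨l1, ih, rfl⟩

theorem pv_mem (lst : List Int) {v : Int} (h : v ∈ pv lst) :
    ∃ x y : Int, [x, y].Sublist lst ∧ v = find_gcd x y := by
  induction lst with
  | nil => simp [pv] at h
  | cons a rest ih =>
    simp only [pv, List.mem_append, List.mem_map] at h
    rcases h with ⟨b, hb, rfl⟩ | h
    · exact ⟨a, b, List.cons_sublist_cons.mpr (List.singleton_sublist.mpr hb), rfl⟩
    · obtain ⟨x, y, hs, rfl⟩ := ih h
      exact ⟨x, y, hs.cons a, rfl⟩

theorem mem_pv_of_sublist {x y : Int} {lst : List Int} (h : [x, y].Sublist lst) :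
    find_gcd x y ∈ pv lst := by
  induction lst with
  | nil => simp at h
  | cons a t ih =>
    cases h with
    | cons _ h' =>
      simp only [pv, List.mem_append]
      right
      exact ih h'
    | cons₂ _ h' =>
      simp only [pv, List.mem_append, List.mem_map]
      left
      exact ⟨y, List.singleton_sublist.mp h', rfl⟩

theorem foldl_max_le (l : List Int) (a K : Int) (ha : a ≤ K) (h : ∀ v ∈ l, v ≤ K) :
    l.foldl max a ≤ K := by
  induction l generalizing a with
  | nil => exact ha
  | cons v t ih =>
    exact ih _ (max_le ha (h v (List.mem_cons_self))) (fun w hw => h w (List.mem_cons_of_mem _ hw))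

theorem sizesI_nil (n : Int) (h : ¬ 1 < n) : sizesI n = [] := by
  unfold sizesI
  have h0 : (n - 1).toNat = 0 := by omega
  rw [h0]
  rfl

theorem subsets_go_items_aux (lst : List Int) :
    ∀ (m : Nat) (n : Int) (d : PySem.Dict Int (List (List Int))), n.toNat ≤ m →
      (∀ k : Int, 1 < k → k ≤ n → d.contains k = false) →
      (subsets_go lst n d).items = d.items ++ (sizesI n).map (fun k => (k, findsubsets lst k)) := by
  intro m
  induction m with
  | zero =>
    intro n d h1 h2
    rw [subsets_go, if_neg (by omega), sizesI_nil n (by omega)]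
    simp
  | succ m ih =>
    intro n d h1 h2
    by_cases hn : 1 < n
    · have hcont : ∀ k : Int, 1 < k → k ≤ n - 1 →
          ((d.insert n (findsubsets lst n)).contains k) = false := by
        intro k hk1 hk2
        rw [PySem.Dict.contains_insert]
        have hne : (k == n) = false := by simp only [beq_eq_false_iff_ne, ne_eq]; omega
        rw [hne, Bool.false_or]
        exact h2 k hk1 (by omega)
      rw [subsets_go, if_pos hn, ih (n - 1) _ (by omega) hcont,
        PySem.Dict.items_insert_of_not_contains _ _ (h2 n hn le_rfl), sizesI_cons n hn]
      simp [List.append_assoc]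
    · rw [subsets_go, if_neg hn, sizesI_nil n hn]
      simp

theorem subsets_port_items (lst : List Int) :
    (subsets_port lst).items = (sizesI (lst.length : Int)).map (fun k => (k, findsubsets lst k)) := by
  unfold subsets_port
  rw [subsets_go_items_aux lst (lst.length : Int).toNat _ _ le_rfl
    (fun k _ _ => PySem.Dict.contains_empty k)]
  have he : (PySem.Dict.empty : PySem.Dict Int (List (List Int))).items = [] := rfl
  rw [he, List.nil_append]

theorem nested_flat (ks : List Int) (h : Int → List Int) :
    ∀ m : Int, ks.foldl (fun m k => (h k).foldl max m) m = (ks.flatMap h).foldl max m := by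
  induction ks with
  | nil => intro m; rfl
  | cons k t ih =>
    intro m
    simp only [List.foldl_cons, List.flatMap_cons, List.foldl_append]
    exact ih _

theorem A_eq (lst : List Int) :
    max_possible_gcd lst =
      ((sizesI (lst.length : Int)).flatMap (fun k => (findsubsets lst k).map gcd_list)).foldl max 0 := by
  have hitems := subsets_port_items lst
  have hkeys : (subsets_port lst).keys = sizesI (lst.length : Int) := by
    simp only [PySem.Dict.keys, hitems, List.map_map]
    simp [Function.comp_def]
  have hnodup : (subsets_port lst).keys.Nodup := by
    rw [hkeys]
    unfold sizesI
    apply List.Nodup.map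
    · intro a b hab
      simp only [Int.ofNat_eq_natCast] at hab
      exact_mod_cast hab
    · exact List.nodup_reverse.mpr List.nodup_range'
  simp only [max_possible_gcd]
  rw [hkeys]
  have hpoint : ∀ (acc : Int), ∀ i ∈ sizesI (lst.length : Int),
      (if 2 ≤ i then List.foldl (fun m j => max m (gcd_list j)) acc
        ((subsets_port lst).getD i []) else acc)
        = ((findsubsets lst i).map gcd_list).foldl max acc := by
    intro acc i hi
    have h2 : (2 : Int) ≤ i := (mem_sizesI.mp hi).1
    rw [if_pos h2]
    have hgetD : (subsets_port lst).getD i [] = findsubsets lst i := by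
      apply PySem.Dict.getD_of_mem_items
      · rw [hitems]
        exact List.mem_map.mpr ⟨i, hi, rfl⟩
      · exact hnodup
    rw [hgetD, List.foldl_map]
  rw [PySem.List.foldl_congr_mem _ _ _ 0 hpoint]
  exact nested_flat _ (fun k => (findsubsets lst k).map gcd_list) 0

theorem alt_go_eq (lst : List Int) : ∀ m : Int, alt_go lst m = (pv lst).foldl max m := by
  induction lst with
  | nil => intro m; rfl
  | cons a rest ih =>
    intro m
    show alt_go rest _ = _
    rw [ih]
    simp only [pv, List.foldl_append]
    congr 1
    rw [List.foldl_map]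
    apply PySem.List.foldl_congr_mem
    intro acc b _
    simp only [euclid_eq_find_gcd]
    split <;> omega

theorem B_eq (lst : List Int) : max_possible_gcd_alt lst = (pv lst).foldl max 0 :=
  alt_go_eq lst 0

-- ===== VERDICT (by name: the statement is the Claim_ definition above) =====
theorem max_possible_gcd_spec : Claim_equal_max_possible_gcd := by
  intro lst _
  unfold Spec_max_possible_gcd
  rw [A_eq, B_eq]
  apply le_antisymm
  · apply foldl_max_le _ _ _ (PySem.List.le_foldl_max (pv lst) 0).1
    intro v hv
    rw [List.mem_flatMap] at hv
    obtain ⟨k, hk, hv⟩ := hv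
    rw [List.mem_map] at hv
    obtain ⟨c, hc, rfl⟩ := hv
    obtain ⟨hsub, hlen⟩ := combos_mem c lst k.toNat hc
    have hk2 : (2 : Int) ≤ k := (mem_sizesI.mp hk).1
    match c, hsub, hlen with
    | [], _, hlen => simp at hlen; omega
    | [_], _, hlen => simp at hlen; omega
    | a :: b :: rest, hsub, _ =>
      by_cases hpos : 0 < gcd_list (a :: b :: rest)
      · simp only [gcd_list] at hpos ⊢
        obtain ⟨z, hz, hle, hzpos⟩ := exists_pair rest a b hpos
        have hsub2 : [a, z].Sublist lst :=
          (List.cons_sublist_cons.mpr (List.singleton_sublist.mpr hz)).trans hsub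
        have hm := (PySem.List.le_foldl_max (pv lst) 0).2 _ (mem_pv_of_sublist hsub2)
        omega
      · have h0 := (PySem.List.le_foldl_max (pv lst) 0).1
        omega
  · apply foldl_max_le _ _ _
      (PySem.List.le_foldl_max ((sizesI (lst.length : Int)).flatMap
        (fun k => (findsubsets lst k).map gcd_list)) 0).1
    intro v hv
    obtain ⟨x, y, hsub, rfl⟩ := pv_mem lst hv
    have hlen : 2 ≤ lst.length := by
      have := hsub.length_le
      simpa using this
    have hc : [x, y] ∈ combos lst 2 := mem_combos_of_sublist hsub
    refine (PySem.List.le_foldl_max _ 0).2 _ ?_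
    rw [List.mem_flatMap]
    refine ⟨(2 : Int), mem_sizesI.mpr ⟨le_rfl, by omega⟩, ?_⟩
    rw [List.mem_map]
    exact ⟨[x, y], hc, by simp [gcd_list]⟩
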